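-- pv_equiv track=rewrite | github.com/margaritatsobenko/HSE_Diploma | data/gnn/utils.py | update_keys
-- ===== SOURCE A (Python) =====
-- def update_keys(stations):
--     d = {}
--     for k, v in stations.items():
--         if k < 91:
--             d[k] = v
--         elif 91 <= k < 111:
--             d[k + 1] = v
--         elif 111 <= k < 148:
--             d[k + 2] = v
--         elif 148 <= k < 158:
--             d[k + 3] = v
--         elif 158 <= k:
--             d[k + 4] = v
--     return d
-- ===== SOURCE B (Python) =====
-- def update_keys(stations):
--     # Staged passes: for each gap boundary, in descending order, rebuild the
--     # dict shifting every key at or above the boundary up by one slot.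
--     d = dict(stations)
--     for t in (158, 148, 111, 91):
--         d = {(k + 1 if k >= t else k): v for k, v in d.items()}
--     return d
-- ===== Notes on version B (the rewrite author's own statement) =====
-- stated objective: alternative
-- what changed: Replaces A's single-pass five-branch if/elif ladder with four staged whole-dict rebuild passes: for each gap boundary 158,148,111,91 in descending order, every key at or above the boundary is shifted up by one, the composed shifts reproducing A's offsets.
import Mathlib
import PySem

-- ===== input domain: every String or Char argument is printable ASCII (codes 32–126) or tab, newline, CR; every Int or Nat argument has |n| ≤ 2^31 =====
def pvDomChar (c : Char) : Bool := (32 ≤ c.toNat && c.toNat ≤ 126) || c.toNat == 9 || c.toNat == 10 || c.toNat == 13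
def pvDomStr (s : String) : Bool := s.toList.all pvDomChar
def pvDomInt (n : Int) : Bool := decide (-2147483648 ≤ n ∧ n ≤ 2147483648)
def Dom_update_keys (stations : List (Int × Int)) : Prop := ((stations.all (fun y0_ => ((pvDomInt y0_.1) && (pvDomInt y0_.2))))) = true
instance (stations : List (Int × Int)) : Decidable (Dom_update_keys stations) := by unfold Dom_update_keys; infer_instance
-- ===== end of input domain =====

-- B replaces A's single-pass if/elif ladder by four staged whole-dict rebuild passes, one per gap boundary in descending order; objective: alternative.

-- ===== PORT A =====
def update_keys (stations : List (Int × Int)) : List (Int × Int) :=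
  (stations.foldl (fun d kv =>
    if kv.1 < 91 then d.insert kv.1 kv.2
    else if 91 ≤ kv.1 ∧ kv.1 < 111 then d.insert (kv.1 + 1) kv.2
    else if 111 ≤ kv.1 ∧ kv.1 < 148 then d.insert (kv.1 + 2) kv.2
    else if 148 ≤ kv.1 ∧ kv.1 < 158 then d.insert (kv.1 + 3) kv.2
    else if 158 ≤ kv.1 then d.insert (kv.1 + 4) kv.2
    else d) (PySem.Dict.empty : PySem.Dict Int Int)).items

-- ===== PORT B =====
-- one rebuild pass: {(k + 1 if k >= t else k): v for k, v in d.items()}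
def pvShiftPass (t : Int) (d : PySem.Dict Int Int) : PySem.Dict Int Int :=
  d.items.foldl (fun d' kv => d'.insert (if kv.1 ≥ t then kv.1 + 1 else kv.1) kv.2)
    (PySem.Dict.empty : PySem.Dict Int Int)

def update_keys_alt (stations : List (Int × Int)) : List (Int × Int) :=
  (([(158 : Int), 148, 111, 91]).foldl (fun d t => pvShiftPass t d)
    (PySem.Dict.ofList stations)).items

-- ===== PRECONDITION & SPEC =====
def Spec_update_keys (stations : List (Int × Int)) (out : List (Int × Int)) : Prop := out = update_keys_alt stations
instance (stations : List (Int × Int)) (out : List (Int × Int)) : Decidable (Spec_update_keys stations out) := by unfold Spec_update_keys; infer_instance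

-- ===== CLAIM (what is proved, stated in full; the proofs are below) =====
def Claim_equal_update_keys : Prop := ∀ (stations : List (Int × Int)), Dom_update_keys stations → Spec_update_keys stations (update_keys stations)

-- ===== LEMMAS AND PROOFS =====

-- A's ladder offset as a single function
def pvLadder (k : Int) : Int :=
  if k < 91 then k else if k < 111 then k + 1 else if k < 148 then k + 2
  else if k < 158 then k + 3 else k + 4

-- one shift step
def pvShift (t k : Int) : Int := if k ≥ t then k + 1 else k

theorem pvShift_inj (t : Int) : Function.Injective (pvShift t) := by
  intro a b h
  simp only [pvShift] at h
  split_ifs at h <;> omega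

theorem pvLadder_inj : Function.Injective pvLadder := by
  intro a b h
  simp only [pvLadder] at h
  split_ifs at h <;> omega

-- the four shifts compose to the ladder
theorem shifts_compose (k : Int) :
    pvShift 91 (pvShift 111 (pvShift 148 (pvShift 158 k))) = pvLadder k := by
  simp only [pvShift, pvLadder]
  split_ifs <;> omega

-- rekeying a dict by an injective function, on the representation
def pvMapKeys (g : Int → Int) (d : PySem.Dict Int Int) : PySem.Dict Int Int :=
  PySem.Dict.mk (d.items.map (fun a => (g a.1, a.2)))

theorem keys_pvMapKeys (g : Int → Int) (d : PySem.Dict Int Int) :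
    (pvMapKeys g d).keys = d.keys.map g := by
  simp [pvMapKeys, PySem.Dict.keys, List.map_map, Function.comp_def]

theorem contains_pvMapKeys (g : Int → Int) (hg : Function.Injective g)
    (d : PySem.Dict Int Int) (k : Int) :
    (pvMapKeys g d).contains (g k) = d.contains k := by
  rw [PySem.Dict.contains_eq_decide_mem_keys, PySem.Dict.contains_eq_decide_mem_keys,
    keys_pvMapKeys]
  simp [List.mem_map, hg.eq_iff]

theorem insert_pvMapKeys (g : Int → Int) (hg : Function.Injective g)
    (d : PySem.Dict Int Int) (k v : Int) :
    (pvMapKeys g d).insert (g k) v = pvMapKeys g (d.insert k v) := by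
  apply PySem.Dict.ext
  rw [PySem.Dict.items_insert, contains_pvMapKeys g hg]
  show _ = ((d.insert k v).items.map _)
  rw [PySem.Dict.items_insert]
  by_cases h : d.contains k = true
  · simp only [h, if_true, pvMapKeys, List.map_map]
    apply List.map_congr_left
    intro a _
    simp only [Function.comp_def, beq_iff_eq, hg.eq_iff]
    split_ifs <;> rfl
  · simp only [h, pvMapKeys]
    simp

theorem foldl_insert_pvMapKeys (g : Int → Int) (hg : Function.Injective g)
    (l : List (Int × Int)) (d : PySem.Dict Int Int) :
    l.foldl (fun d kv => d.insert (g kv.1) kv.2) (pvMapKeys g d)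
      = pvMapKeys g (l.foldl (fun d kv => d.insert kv.1 kv.2) d) := by
  induction l generalizing d with
  | nil => rfl
  | cons a l ih =>
    simp only [List.foldl_cons]
    rw [insert_pvMapKeys g hg, ih]

theorem pvMapKeys_empty (g : Int → Int) :
    pvMapKeys g (PySem.Dict.empty : PySem.Dict Int Int) = PySem.Dict.empty := rfl

-- a rebuild pass on a nodup-key dict is exactly a rekeying
theorem pvShiftPass_eq (t : Int) (d : PySem.Dict Int Int) (hnd : d.keys.Nodup) :
    pvShiftPass t d = pvMapKeys (pvShift t) d := by
  apply PySem.Dict.ext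
  show (d.items.foldl (fun d' kv => d'.insert (if kv.1 ≥ t then kv.1 + 1 else kv.1) kv.2)
    PySem.Dict.empty).items = _
  have h := PySem.Dict.items_foldl_insert_fresh d.items
      (fun kv => pvShift t kv.1) (fun kv => kv.2)
      (PySem.Dict.empty : PySem.Dict Int Int)
      (by intro a _; exact PySem.Dict.contains_empty _)
      (by
        have : d.items.map (fun kv => pvShift t kv.1) = d.keys.map (pvShift t) := by
          simp [PySem.Dict.keys, List.map_map, Function.comp_def]
        rw [this]
        exact hnd.map (pvShift_inj t))
  simp only [pvShift] at h
  rw [h]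
  rfl

theorem nodup_keys_pvMapKeys (g : Int → Int) (hg : Function.Injective g)
    (d : PySem.Dict Int Int) (hnd : d.keys.Nodup) : (pvMapKeys g d).keys.Nodup := by
  rw [keys_pvMapKeys]; exact hnd.map hg

theorem pvMapKeys_comp (g₁ g₂ : Int → Int) (d : PySem.Dict Int Int) :
    pvMapKeys g₁ (pvMapKeys g₂ d) = pvMapKeys (fun k => g₁ (g₂ k)) d := by
  apply PySem.Dict.ext
  simp [pvMapKeys, List.map_map, Function.comp_def]

-- A's ladder step rewritten as one insert at the ladder key
theorem ladder_step (d : PySem.Dict Int Int) (kv : Int × Int) :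
    (if kv.1 < 91 then d.insert kv.1 kv.2
     else if 91 ≤ kv.1 ∧ kv.1 < 111 then d.insert (kv.1 + 1) kv.2
     else if 111 ≤ kv.1 ∧ kv.1 < 148 then d.insert (kv.1 + 2) kv.2
     else if 148 ≤ kv.1 ∧ kv.1 < 158 then d.insert (kv.1 + 3) kv.2
     else if 158 ≤ kv.1 then d.insert (kv.1 + 4) kv.2
     else d) = d.insert (pvLadder kv.1) kv.2 := by
  simp only [pvLadder]
  split_ifs <;> first | rfl | (congr 1; omega)

-- ===== VERDICT (by name: the statement is the Claim_ definition above) =====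
theorem update_keys_spec : Claim_equal_update_keys := by
  intro stations _
  show update_keys stations = update_keys_alt stations
  unfold update_keys update_keys_alt
  -- A side: fold of ladder inserts = rekeying of the plain dict
  have hA : (stations.foldl (fun d kv =>
      if kv.1 < 91 then d.insert kv.1 kv.2
      else if 91 ≤ kv.1 ∧ kv.1 < 111 then d.insert (kv.1 + 1) kv.2
      else if 111 ≤ kv.1 ∧ kv.1 < 148 then d.insert (kv.1 + 2) kv.2
      else if 148 ≤ kv.1 ∧ kv.1 < 158 then d.insert (kv.1 + 3) kv.2
      else if 158 ≤ kv.1 then d.insert (kv.1 + 4) kv.2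
      else d) (PySem.Dict.empty : PySem.Dict Int Int))
      = pvMapKeys pvLadder (PySem.Dict.ofList stations) := by
    have hf : (fun (d : PySem.Dict Int Int) (kv : Int × Int) =>
        if kv.1 < 91 then d.insert kv.1 kv.2
        else if 91 ≤ kv.1 ∧ kv.1 < 111 then d.insert (kv.1 + 1) kv.2
        else if 111 ≤ kv.1 ∧ kv.1 < 148 then d.insert (kv.1 + 2) kv.2
        else if 148 ≤ kv.1 ∧ kv.1 < 158 then d.insert (kv.1 + 3) kv.2
        else if 158 ≤ kv.1 then d.insert (kv.1 + 4) kv.2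
        else d) = fun d kv => d.insert (pvLadder kv.1) kv.2 :=
      funext fun d => funext fun kv => ladder_step d kv
    rw [hf, ← pvMapKeys_empty pvLadder, foldl_insert_pvMapKeys pvLadder pvLadder_inj]
    rfl
  -- B side: four passes = rekeying by the composed shifts
  have hnd0 := PySem.Dict.nodup_keys_ofList stations
  have hB : ([(158 : Int), 148, 111, 91]).foldl (fun d t => pvShiftPass t d)
      (PySem.Dict.ofList stations)
      = pvMapKeys (fun k => pvShift 91 (pvShift 111 (pvShift 148 (pvShift 158 k))))
          (PySem.Dict.ofList stations) := by
    simp only [List.foldl_cons, List.foldl_nil]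
    rw [pvShiftPass_eq 158 _ hnd0,
        pvShiftPass_eq 148 _ (nodup_keys_pvMapKeys _ (pvShift_inj 158) _ hnd0),
        pvMapKeys_comp,
        pvShiftPass_eq 111 _ (nodup_keys_pvMapKeys _
          (fun a b h => pvShift_inj 158 (pvShift_inj 148 h)) _ hnd0),
        pvMapKeys_comp,
        pvShiftPass_eq 91 _ (nodup_keys_pvMapKeys _
          (fun a b h => pvShift_inj 158 (pvShift_inj 148 (pvShift_inj 111 h))) _ hnd0),
        pvMapKeys_comp]
  rw [hA, hB]
  have : (fun k => pvShift 91 (pvShift 111 (pvShift 148 (pvShift 158 k)))) = pvLadder :=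
    funext shifts_compose
  rw [this]
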